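-- pv_equiv track=rewrite | github.com/syb3181/BiDAF | model/data_loader.py | __find_ind_in_tk_list
-- ===== SOURCE A (Python) =====
-- def __find_ind_in_tk_list(tk_list, target: str):
--     target = target.replace(' ', '')
--     for i in range(len(tk_list)):
--         s = tk_list[i]
--         j = i + 1
--         while j < len(tk_list) and target.startswith(s + tk_list[j]):
--             s = s + tk_list[j]
--             j += 1
--         if target == s:
--             return i, j - 1
--     return -1, -1
-- ===== SOURCE B (Python) =====
-- def __find_ind_in_tk_list(tk_list, target: str):
--     # Concatenate the tokens once, record boundary offsets and the last token
--     # index ending at each offset; a span matches exactly when some start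
--     # boundary p has p + len(target) as an end boundary and target occurs at p.
--     target = target.replace(' ', '')
--     L = len(target)
--     full = ''.join(tk_list)
--     starts = []
--     ends = {}  # cumulative end offset -> last token index ending there
--     p = 0
--     for i, tk in enumerate(tk_list):
--         starts.append(p)
--         p += len(tk)
--         ends[p] = i
--     for i, p in enumerate(starts):
--         e = ends.get(p + L, -1)
--         if e >= i and full.startswith(target, p):
--             return i, e
--     return -1, -1
-- ===== Notes on version B (the rewrite author's own statement) =====
-- stated objective: alternative
-- what changed: B concatenates all tokens once, records cumulative boundary offsets and a dict mapping each end offset to the last token index ending there, then finds the answer with one early-exit startswith check per start boundary, replacing A's nested greedy loop that rebuilds the candidate string by repeated concatenation for every start index.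
import Mathlib
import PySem

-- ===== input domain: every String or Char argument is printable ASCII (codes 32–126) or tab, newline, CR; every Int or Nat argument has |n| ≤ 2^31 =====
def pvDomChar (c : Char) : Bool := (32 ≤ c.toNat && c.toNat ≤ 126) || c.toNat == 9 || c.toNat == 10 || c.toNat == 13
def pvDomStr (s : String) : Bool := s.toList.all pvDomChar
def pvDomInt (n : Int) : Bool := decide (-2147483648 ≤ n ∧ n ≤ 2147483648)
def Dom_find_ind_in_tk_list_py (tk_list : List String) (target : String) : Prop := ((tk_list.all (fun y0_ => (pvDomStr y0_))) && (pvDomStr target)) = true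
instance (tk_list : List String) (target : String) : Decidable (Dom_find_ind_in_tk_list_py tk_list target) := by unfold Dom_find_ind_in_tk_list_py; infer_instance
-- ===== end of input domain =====

-- B concatenates the tokens once, records boundary offsets and the last token index
-- ending at each offset, and finds the span by one prefix check per start boundary
-- (objective: alternative — an index over the concatenation instead of A's nested greedy loop).

-- ===== PORT A =====
-- inner while loop: while j < len(tk_list) and target.startswith(s + tk_list[j]): s += tk_list[j]; j += 1
def pvAInner (tk : List (List Char)) (tgt : List Char) (s : List Char) (j : Nat) :
    List Char × Nat :=
  if h : j < tk.length then
    if PySem.Chars.startswith tgt (s ++ tk[j]) then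
      pvAInner tk tgt (s ++ tk[j]) (j + 1)
    else (s, j)
  else (s, j)
termination_by tk.length - j

-- outer for loop over i
def pvAOuter (tk : List (List Char)) (tgt : List Char) (i : Nat) : Int × Int :=
  if h : i < tk.length then
    let r := pvAInner tk tgt tk[i] (i + 1)
    if tgt = r.1 then ((i : Int), (r.2 : Int) - 1)
    else pvAOuter tk tgt (i + 1)
  else (-1, -1)
termination_by tk.length - i

def find_ind_in_tk_list_py (tk_list : List String) (target : String) : Int × Int :=
  pvAOuter (tk_list.map String.toList) (PySem.Chars.replace target.toList [' '] []) 0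

-- ===== PORT B =====
-- for i, tk in enumerate(tk_list): starts.append(p); p += len(tk); ends[p] = i
def pvBBuild (ts : List (List Char)) (i : Nat) (p : Nat) (starts : List Nat)
    (ends : PySem.Dict Nat Int) : List Nat × PySem.Dict Nat Int :=
  match ts with
  | [] => (starts, ends)
  | t :: rest => pvBBuild rest (i + 1) (p + t.length) (starts ++ [p])
      (ends.insert (p + t.length) (i : Int))

-- for i, p in enumerate(starts): e = ends.get(p+L, -1); if e >= i and full.startswith(target, p): return i, e
-- full.startswith(target, p) with 0 ≤ p ≤ len(full) is exactly startswith of full[p:], i.e. of full.drop p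
def pvBScan (tgt : List Char) (L : Nat) (full : List Char) (ends : PySem.Dict Nat Int)
    (i : Nat) : List Nat → Int × Int
  | [] => (-1, -1)
  | p :: rest =>
      let e := ends.getD (p + L) (-1)
      if e ≥ (i : Int) ∧ PySem.Chars.startswith (full.drop p) tgt
      then ((i : Int), e)
      else pvBScan tgt L full ends (i + 1) rest

def find_ind_in_tk_list_py_alt (tk_list : List String) (target : String) : Int × Int :=
  let tgt := PySem.Chars.replace target.toList [' '] []
  let L := tgt.length
  let full := PySem.Chars.join [] (tk_list.map String.toList)
  let r := pvBBuild (tk_list.map String.toList) 0 0 [] PySem.Dict.empty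
  pvBScan tgt L full r.2 0 r.1

-- ===== PRECONDITION & SPEC =====
def Spec_find_ind_in_tk_list_py (tk_list : List String) (target : String) (out : Int × Int) : Prop := out = find_ind_in_tk_list_py_alt tk_list target
instance (tk_list : List String) (target : String) (out : Int × Int) : Decidable (Spec_find_ind_in_tk_list_py tk_list target out) := by unfold Spec_find_ind_in_tk_list_py; infer_instance

-- ===== CLAIM (what is proved, stated in full; the proofs are below) =====
def Claim_equal_find_ind_in_tk_list_py : Prop := ∀ (tk_list : List String) (target : String), Dom_find_ind_in_tk_list_py tk_list target → Spec_find_ind_in_tk_list_py tk_list target (find_ind_in_tk_list_py tk_list target)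

-- ===== LEMMAS AND PROOFS =====

-- cumulative offset of token i in the concatenation
def pvCum (tk : List (List Char)) (i : Nat) : Nat := ((tk.take i).flatten).length

-- concatenation of tokens i..m-1
def pvSeg (tk : List (List Char)) (i m : Nat) : List Char := ((tk.take m).drop i).flatten

-- proof-side reading of the ends dictionary: last token index ending at offset q
def pvLastEnd (ts : List (List Char)) (i : Nat) (p q : Nat) (d : Int) : Int :=
  match ts with
  | [] => d
  | t :: rest => pvLastEnd rest (i + 1) (p + t.length) q
      (if p + t.length = q then (i : Int) else d)

lemma pv_join_nil (parts : List (List Char)) : PySem.Chars.join [] parts = parts.flatten := by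
  show List.intercalate [] parts = parts.flatten
  induction parts with
  | nil => rfl
  | cons h t ih =>
    cases t with
    | nil => simp [List.intercalate]
    | cons a b =>
      simp only [List.intercalate, List.intersperse] at *
      simpa using ih

lemma pvCum_cons (t : List Char) (rest : List (List Char)) (k : Nat) :
    pvCum (t :: rest) (k + 1) = t.length + pvCum rest k := by
  simp [pvCum]

lemma pvCum_succ (tk : List (List Char)) (i : Nat) (h : i < tk.length) :
    pvCum tk (i + 1) = pvCum tk i + (tk[i]).length := by
  have key : (tk.take (i + 1)).flatten = (tk.take i).flatten ++ tk[i] := by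
    rw [List.take_add_one, List.getElem?_eq_getElem h]
    rw [Option.toList_some, List.flatten_append]
    simp
  unfold pvCum
  rw [key, List.length_append]

lemma pvCum_add (tk : List (List Char)) (i j : Nat) (h : i ≤ j) :
    pvCum tk j = pvCum tk i + (pvSeg tk i j).length := by
  unfold pvCum pvSeg
  conv_lhs => rw [← List.take_append_drop i (tk.take j)]
  rw [List.take_take, min_eq_left h, List.flatten_append, List.length_append]

lemma pvCum_mono (tk : List (List Char)) (i j : Nat) (h : i ≤ j) :
    pvCum tk i ≤ pvCum tk j := by
  rw [pvCum_add tk i j h]; omega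

lemma pvSeg_refl (tk : List (List Char)) (i : Nat) : pvSeg tk i i = [] := by
  simp [pvSeg]

lemma pvSeg_cons (tk : List (List Char)) (i m : Nat) (h1 : i < m) (h2 : m ≤ tk.length) :
    pvSeg tk i m = tk[i]'(by omega) ++ pvSeg tk (i + 1) m := by
  unfold pvSeg
  rw [List.drop_eq_getElem_cons (by simp; omega)]
  simp

lemma pv_drop_cum (tk : List (List Char)) (i m : Nat) (h1 : i ≤ m) (_h2 : m ≤ tk.length) :
    tk.flatten.drop (pvCum tk i) = pvSeg tk i m ++ (tk.drop m).flatten := by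
  have hsplit : tk.flatten = (tk.take m).flatten ++ (tk.drop m).flatten := by
    conv_lhs => rw [← List.take_append_drop m tk]
    rw [List.flatten_append]
  rw [hsplit]
  have hlen : pvCum tk i ≤ ((tk.take m).flatten).length := by
    have := pvCum_mono tk i m h1
    simpa [pvCum] using this
  rw [List.drop_append_of_le_length hlen]
  congr 1
  unfold pvSeg pvCum
  have htt : List.take i tk = List.take i (List.take m tk) := by
    rw [List.take_take, min_eq_left h1]
  have h4 : (List.take m tk).flatten = (List.take i tk).flatten ++ (List.drop i (List.take m tk)).flatten := by
    rw [htt, ← List.flatten_append, List.take_append_drop]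
  rw [h4, List.drop_append_of_le_length (le_refl _)]
  simp

lemma pv_startswith_append_self (tgt t : List Char) :
    PySem.Chars.startswith tgt (tgt ++ t) = true ↔ t = [] := by
  rw [PySem.Chars.startswith_iff]
  constructor
  · intro h
    have hl := h.length_le
    rw [List.length_append] at hl
    exact List.eq_nil_of_length_eq_zero (by omega)
  · rintro rfl; simp

-- characterisation of A's inner while loop
lemma pvAInner_spec (tk : List (List Char)) (tgt : List Char) :
    ∀ (d : Nat) (s : List Char) (j : Nat), tk.length - j = d → j ≤ tk.length →
    (((pvAInner tk tgt s j).1 = tgt ↔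
        ∃ m, j ≤ m ∧ m ≤ tk.length ∧ s ++ pvSeg tk j m = tgt) ∧
     ((pvAInner tk tgt s j).1 = tgt →
        j ≤ (pvAInner tk tgt s j).2 ∧ (pvAInner tk tgt s j).2 ≤ tk.length ∧
        s ++ pvSeg tk j (pvAInner tk tgt s j).2 = tgt ∧
        ((pvAInner tk tgt s j).2 = tk.length ∨
          ∃ h : (pvAInner tk tgt s j).2 < tk.length, tk[(pvAInner tk tgt s j).2] ≠ []))) := by
  intro d
  induction d with
  | zero =>
    intro s j hd hj
    have hj' : j = tk.length := by omega
    rw [pvAInner, dif_neg (by omega)]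
    refine ⟨⟨?_, ?_⟩, ?_⟩
    · intro h
      have h' : s = tgt := h
      exact ⟨j, le_refl j, hj, by simp [pvSeg_refl, h']⟩
    · rintro ⟨m, hm1, hm2, hm3⟩
      have hmj : m = j := by omega
      subst hmj
      simpa [pvSeg_refl] using hm3
    · intro h
      have h' : s = tgt := h
      exact ⟨le_refl j, hj, by simp [pvSeg_refl, h'], Or.inl hj'⟩
  | succ d ih =>
    intro s j hd hj
    have hjlt : j < tk.length := by omega
    rw [pvAInner, dif_pos hjlt]
    by_cases hsw : PySem.Chars.startswith tgt (s ++ tk[j]) = true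
    · rw [if_pos hsw]
      obtain ⟨IH1, IH2⟩ := ih (s ++ tk[j]) (j + 1) (by omega) (by omega)
      refine ⟨⟨?_, ?_⟩, ?_⟩
      · intro h
        obtain ⟨m, hm1, hm2, hm3⟩ := IH1.mp h
        refine ⟨m, by omega, hm2, ?_⟩
        rw [pvSeg_cons tk j m (by omega) hm2, ← List.append_assoc]
        exact hm3
      · rintro ⟨m, hm1, hm2, hm3⟩
        rcases Nat.eq_or_lt_of_le hm1 with hmj | hmlt
        · -- m = j, so s = tgt and tk[j] must be empty
          have hs : s = tgt := by
            rw [← hmj] at hm3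
            simpa [pvSeg_refl] using hm3
          subst hs
          have hnil : tk[j] = [] := (pv_startswith_append_self s _).mp hsw
          apply IH1.mpr
          exact ⟨j + 1, le_refl _, by omega, by simp [hnil, pvSeg_refl]⟩
        · apply IH1.mpr
          refine ⟨m, by omega, hm2, ?_⟩
          rw [List.append_assoc, ← pvSeg_cons tk j m (by omega) hm2]
          exact hm3
      · intro h
        obtain ⟨h1, h2, h3, h4⟩ := IH2 h
        refine ⟨by omega, h2, ?_, h4⟩
        rw [pvSeg_cons tk j _ (by omega) h2, ← List.append_assoc]
        exact h3
    · rw [if_neg hsw]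
      have hmain : ∀ m, j ≤ m → m ≤ tk.length → s ++ pvSeg tk j m = tgt → s = tgt := by
        intro m hm1 hm2 hm3
        rcases Nat.eq_or_lt_of_le hm1 with hmj | hmlt
        · rw [← hmj] at hm3; simpa [pvSeg_refl] using hm3
        · exfalso
          apply hsw
          rw [PySem.Chars.startswith_iff]
          refine ⟨pvSeg tk (j + 1) m, ?_⟩
          rw [List.append_assoc, ← pvSeg_cons tk j m (by omega) hm2]
          exact hm3
      refine ⟨⟨?_, ?_⟩, ?_⟩
      · intro h
        have h' : s = tgt := h
        exact ⟨j, le_refl j, hj, by simp [pvSeg_refl, h']⟩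
      · rintro ⟨m, hm1, hm2, hm3⟩
        exact hmain m hm1 hm2 hm3
      · intro h
        have h' : s = tgt := h
        refine ⟨le_refl j, hj, by simp [pvSeg_refl, h'], Or.inr ⟨hjlt, ?_⟩⟩
        intro hnil
        apply hsw
        have hnil' : tk[j] = [] := hnil
        rw [h', hnil', List.append_nil, PySem.Chars.startswith_iff]

-- the dict built by pvBBuild reads back as pvLastEnd
lemma pvBBuild_getD (ts : List (List Char)) :
    ∀ (i p : Nat) (starts : List Nat) (ends : PySem.Dict Nat Int) (q : Nat),
    ((pvBBuild ts i p starts ends).2).getD q (-1) = pvLastEnd ts i p q (ends.getD q (-1)) := by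
  induction ts with
  | nil => intro i p starts ends q; rfl
  | cons t rest ih =>
    intro i p starts ends q
    show ((pvBBuild rest (i + 1) (p + t.length) (starts ++ [p])
        (ends.insert (p + t.length) (i : Int))).2).getD q (-1) = _
    rw [ih]
    show _ = pvLastEnd rest (i + 1) (p + t.length) q
      (if p + t.length = q then (i : Int) else ends.getD q (-1))
    congr 1
    rw [PySem.Dict.getD_insert]
    by_cases hq : p + t.length = q
    · simp [hq]
    · simp [hq, Ne.symm hq]

lemma pvBBuild_fst (ts : List (List Char)) :
    ∀ (i p : Nat) (starts : List Nat) (ends : PySem.Dict Nat Int),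
    (pvBBuild ts i p starts ends).1 = starts ++ (List.range ts.length).map (fun k => p + pvCum ts k) := by
  induction ts with
  | nil => intro i p starts ends; simp [pvBBuild]
  | cons t rest ih =>
    intro i p starts ends
    show (pvBBuild rest (i + 1) (p + t.length) (starts ++ [p])
        (ends.insert (p + t.length) (i : Int))).1 = _
    rw [ih]
    rw [List.length_cons, List.range_succ_eq_map]
    simp only [List.map_cons, List.map_map]
    have : ((fun k => p + pvCum (t :: rest) k) ∘ Nat.succ) = fun k => (p + t.length) + pvCum rest k := by
      funext k
      simp [Function.comp, pvCum_cons]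
      omega
    rw [this]
    simp [pvCum]

lemma pvLastEnd_spec (ts : List (List Char)) :
    ∀ (i p : Nat) (d : Int),
    ∀ q : Nat,
    (pvLastEnd ts i p q d = d ∧ ∀ k, k < ts.length → p + pvCum ts (k + 1) ≠ q) ∨
    (∃ k, k < ts.length ∧ p + pvCum ts (k + 1) = q ∧ pvLastEnd ts i p q d = (i : Int) + k ∧
      ∀ u, k < u → u < ts.length → p + pvCum ts (u + 1) ≠ q) := by
  induction ts with
  | nil =>
    intro i p d q
    left
    refine ⟨rfl, ?_⟩
    intro k hk
    simp at hk
  | cons t rest ih =>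
    intro i p d q
    have hred : pvLastEnd (t :: rest) i p q d =
        pvLastEnd rest (i + 1) (p + t.length) q
          (if p + t.length = q then (i : Int) else d) := rfl
    rcases ih (i + 1) (p + t.length) (if p + t.length = q then (i : Int) else d) q with
      ⟨hval, hnone⟩ | ⟨k, hk, hkq, hval, hmax⟩
    · by_cases hq : p + t.length = q
      · right
        refine ⟨0, by simp, by simpa [pvCum_cons] using hq, ?_, ?_⟩
        · rw [hred, hval, if_pos hq]; simp
        · intro u hu hul
          obtain ⟨u', rfl⟩ : ∃ u', u = u' + 1 := ⟨u - 1, by omega⟩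
          rw [pvCum_cons]
          have := hnone u' (by simpa using hul)
          omega
      · left
        refine ⟨by rw [hred, hval, if_neg hq], ?_⟩
        intro k hk
        match k with
        | 0 => simpa [pvCum_cons] using hq
        | k' + 1 =>
          rw [pvCum_cons]
          have := hnone k' (by simpa using hk)
          omega
    · right
      refine ⟨k + 1, by simpa using hk, by rw [pvCum_cons]; omega, by rw [hred, hval]; push_cast; ring, ?_⟩
      intro u hu hul
      obtain ⟨u', rfl⟩ : ∃ u', u = u' + 1 := ⟨u - 1, by omega⟩
      rw [pvCum_cons]
      have := hmax u' (by omega) (by simpa using hul)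
      omega

-- per-index agreement of the two loop bodies
lemma pv_cond_iff (tk : List (List Char)) (tgt : List Char) (i : Nat) (hi : i < tk.length) :
    (tgt = (pvAInner tk tgt (tk[i]) (i + 1)).1 ↔
      (pvLastEnd tk 0 0 (pvCum tk i + tgt.length) (-1) ≥ (i : Int) ∧
        PySem.Chars.startswith (tk.flatten.drop (pvCum tk i)) tgt = true)) ∧
    (tgt = (pvAInner tk tgt (tk[i]) (i + 1)).1 →
      pvLastEnd tk 0 0 (pvCum tk i + tgt.length) (-1) = ((pvAInner tk tgt (tk[i]) (i + 1)).2 : Int) - 1) := by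
  obtain ⟨inner1, inner2⟩ :=
    pvAInner_spec tk tgt (tk.length - (i + 1)) (tk[i]) (i + 1) rfl (by omega)
  have hslice : ∀ m, i ≤ m → m ≤ tk.length → (pvSeg tk i m).length = tgt.length →
      (tk.flatten.drop (pvCum tk i)).take tgt.length = pvSeg tk i m := by
    intro m h1 h2 hlen
    rw [pv_drop_cum tk i m h1 h2, ← hlen]
    exact List.take_left' rfl
  have hA : tgt = (pvAInner tk tgt (tk[i]) (i + 1)).1 →
      (pvLastEnd tk 0 0 (pvCum tk i + tgt.length) (-1) ≥ (i : Int) ∧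
        PySem.Chars.startswith (tk.flatten.drop (pvCum tk i)) tgt = true) ∧
      pvLastEnd tk 0 0 (pvCum tk i + tgt.length) (-1) =
        ((pvAInner tk tgt (tk[i]) (i + 1)).2 : Int) - 1 := by
    intro h
    obtain ⟨h1, h2, h3, h4⟩ := inner2 h.symm
    set j' := (pvAInner tk tgt (tk[i]) (i + 1)).2 with hj'
    have hseg : pvSeg tk i j' = tgt := by
      rw [pvSeg_cons tk i j' (by omega) h2]
      exact h3
    have hlen : pvCum tk j' = pvCum tk i + tgt.length := by
      rw [pvCum_add tk i j' (by omega), hseg]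
    rcases pvLastEnd_spec tk 0 0 (-1) (pvCum tk i + tgt.length) with ⟨_, hn⟩ | ⟨k, hk, hkq, hv, hmax⟩
    · exfalso
      apply hn (j' - 1) (by omega)
      have : j' - 1 + 1 = j' := by omega
      rw [this]
      omega
    · have hkj : k = j' - 1 := by
        rcases Nat.lt_trichotomy k (j' - 1) with hlt | heq | hgt
        · exfalso
          apply hmax (j' - 1) hlt (by omega)
          have : j' - 1 + 1 = j' := by omega
          rw [this]
          omega
        · exact heq
        · exfalso
          rcases h4 with hn' | ⟨hlt', hne⟩
          · omega
          · have hkk : j' + 1 ≤ k + 1 := by omega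
            have hmono := pvCum_mono tk (j' + 1) (k + 1) hkk
            have hsucc := pvCum_succ tk j' hlt'
            have hpos : 0 < (tk[j']'hlt').length := List.length_pos_iff.mpr hne
            omega
      constructor
      · constructor
        · rw [hv, hkj]; omega
        · rw [PySem.Chars.startswith_iff, ← hseg, ← hslice j' (by omega) h2 (by rw [hseg])]
          exact List.take_prefix _ _
      · rw [hv, hkj]
        omega
  refine ⟨⟨fun h => (hA h).1, ?_⟩, fun h => (hA h).2⟩
  rintro ⟨he, hs⟩
  rcases pvLastEnd_spec tk 0 0 (-1) (pvCum tk i + tgt.length) with ⟨hv, _⟩ | ⟨k, hk, hkq, hv, _⟩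
  · rw [hv] at he
    exfalso
    have : (0 : Int) ≤ (i : Int) := Int.natCast_nonneg i
    omega
  · rw [hv] at he
    have hik : i ≤ k := by
      have : (i : Int) ≤ (0 : Int) + (k : Int) := he
      omega
    have hm2 : k + 1 ≤ tk.length := hk
    have hlen : (pvSeg tk i (k + 1)).length = tgt.length := by
      have := pvCum_add tk i (k + 1) (by omega)
      omega
    have hseg : pvSeg tk i (k + 1) = tgt := by
      rw [← hslice (k + 1) (by omega) hm2 hlen]
      rw [PySem.Chars.startswith_iff] at hs
      exact (List.prefix_iff_eq_take.mp hs).symm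
    symm
    apply inner1.mpr
    refine ⟨k + 1, by omega, hm2, ?_⟩
    rw [← pvSeg_cons tk i (k + 1) (by omega) hm2]
    exact hseg

lemma pv_outer_eq (tk : List (List Char)) (tgt : List Char) :
    ∀ (d i : Nat), tk.length - i = d →
    pvAOuter tk tgt i =
      pvBScan tgt tgt.length tk.flatten ((pvBBuild tk 0 0 [] PySem.Dict.empty).2) i
        (((List.range tk.length).drop i).map (pvCum tk)) := by
  intro d
  induction d with
  | zero =>
    intro i hd
    have hi : tk.length ≤ i := by omega
    rw [pvAOuter, dif_neg (by omega)]
    have hnil : (List.range tk.length).drop i = [] := by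
      apply List.drop_eq_nil_of_le
      simpa using hi
    rw [hnil]
    rfl
  | succ d ih =>
    intro i hd
    have hi : i < tk.length := by omega
    rw [pvAOuter, dif_pos hi]
    have hdrop : (List.range tk.length).drop i = i :: (List.range tk.length).drop (i + 1) := by
      rw [List.drop_eq_getElem_cons (by simpa using hi)]
      simp
    rw [hdrop, List.map_cons]
    show _ = pvBScan tgt tgt.length tk.flatten ((pvBBuild tk 0 0 [] PySem.Dict.empty).2) i
        (pvCum tk i :: ((List.range tk.length).drop (i + 1)).map (pvCum tk))
    rw [pvBScan]
    rw [show ((pvBBuild tk 0 0 [] PySem.Dict.empty).2).getD (pvCum tk i + tgt.length) (-1) =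
        pvLastEnd tk 0 0 (pvCum tk i + tgt.length) (-1) by
      rw [pvBBuild_getD, PySem.Dict.getD_empty]]
    obtain ⟨hiff, hval⟩ := pv_cond_iff tk tgt i hi
    by_cases h : tgt = (pvAInner tk tgt (tk[i]) (i + 1)).1
    · rw [if_pos h, if_pos (hiff.mp h)]
      have he := hval h
      rw [he]
    · rw [if_neg h, if_neg (fun hc => h (hiff.mpr hc))]
      exact ih (i + 1) (by omega)

-- ===== VERDICT (by name: the statement is the Claim_ definition above) =====
theorem find_ind_in_tk_list_py_spec : Claim_equal_find_ind_in_tk_list_py := by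
  intro tk_list target _
  unfold Spec_find_ind_in_tk_list_py find_ind_in_tk_list_py find_ind_in_tk_list_py_alt
  simp only [pv_join_nil, pvBBuild_fst]
  rw [pv_outer_eq _ _ (tk_list.map String.toList).length 0 rfl]
  congr 1
  simp
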